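-- pv_equiv track=rewrite | github.com/digitaldebrisvideo/smrig | smrig/lib/nodepathlib.py | remove_namespace
-- ===== SOURCE A (Python) =====
-- def remove_namespace(node):
-- 	"""
-- 	Remove the namespace from the node path. The function is able to handle
-- 	full path or single path nodes.
--
-- 	:param str node:
-- 	:return: Namespace-less path
-- 	:rtype: str
-- 	"""
-- 	path = ""
-- 	sections = node.split("|")
-- 	sections_num = len(sections)
--
-- 	for i, section in enumerate(sections):
-- 		if section:
-- 			path += section.split(":")[-1]
--
-- 		if i < sections_num - 1:
-- 			path += "|"
--
-- 	return path
-- ===== SOURCE B (Python) =====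
-- def remove_namespace(node):
--     """Single left-to-right character scan: keep a buffer for the current
--     section, clear it on ':', flush it plus '|' on section boundaries."""
--     out = []
--     buf = []
--     for ch in node:
--         if ch == ':':
--             buf = []
--         elif ch == '|':
--             out += buf
--             out.append('|')
--             buf = []
--         else:
--             buf.append(ch)
--     return ''.join(out + buf)
-- ===== Notes on version B (the rewrite author's own statement) =====
-- stated objective: simpler
-- what changed: Replaces the split/enumerate-loop/per-section-split/conditional-rejoin with a single left-to-right character scan holding one buffer that is cleared at a colon and flushed together with the separator at a pipe boundary.
import Mathlib
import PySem

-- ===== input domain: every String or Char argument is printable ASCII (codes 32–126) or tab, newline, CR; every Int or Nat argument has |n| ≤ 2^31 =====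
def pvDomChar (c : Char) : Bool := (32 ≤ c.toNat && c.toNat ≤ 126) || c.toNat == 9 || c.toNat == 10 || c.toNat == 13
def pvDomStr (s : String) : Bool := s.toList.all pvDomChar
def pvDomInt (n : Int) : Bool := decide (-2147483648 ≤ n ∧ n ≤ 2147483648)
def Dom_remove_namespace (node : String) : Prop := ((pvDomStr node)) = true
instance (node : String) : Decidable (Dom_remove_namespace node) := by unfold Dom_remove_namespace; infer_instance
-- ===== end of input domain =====

-- B replaces A's split/enumerate-loop/conditional-join with a single character scan holding
-- one buffer, cleared at a colon and flushed at a pipe boundary (objective: simpler; no speed claim).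

-- ===== PORT A =====
def remove_namespace (node : String) : String :=
  -- sections = node.split("|")  (separator nonempty, so Python's split never raises)
  let sections := PySem.Chars.splitOn node.toList ['|']
  let sections_num : Int := sections.length
  -- for i, section in enumerate(sections): …
  let path := (PySem.List.enumerate sections).foldl
    (fun path p =>
      -- if section: path += section.split(":")[-1]
      -- split(":") is never empty, so [-1] never raises; .getD [] is unreachable
      let path := if p.2 ≠ [] then
          path ++ (PySem.List.pyGet? (PySem.Chars.splitOn p.2 [':']) (-1)).getD []
        else path
      -- if i < sections_num - 1: path += "|"
      if p.1 < sections_num - 1 then path ++ ['|'] else path)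
    []
  String.ofList path

-- ===== PORT B =====
-- state = (out, buf); ':' clears buf, '|' flushes out += buf; out += '|', else buf.append(ch)
def nsStep (s : List Char × List Char) (ch : Char) : List Char × List Char :=
  if ch = ':' then (s.1, [])
  else if ch = '|' then (s.1 ++ s.2 ++ ['|'], [])
  else (s.1, s.2 ++ [ch])

def remove_namespace_alt (node : String) : String :=
  let r := node.toList.foldl nsStep ([], [])
  String.ofList (r.1 ++ r.2)

-- ===== PRECONDITION & SPEC =====
def Spec_remove_namespace (node : String) (out : String) : Prop := out = remove_namespace_alt node
instance (node : String) (out : String) : Decidable (Spec_remove_namespace node out) := by unfold Spec_remove_namespace; infer_instance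

-- ===== CLAIM (what is proved, stated in full; the proofs are below) =====
def Claim_equal_remove_namespace : Prop := ∀ (node : String), Dom_remove_namespace node → Spec_remove_namespace node (remove_namespace node)

-- ===== LEMMAS AND PROOFS =====

-- Structural characterisation of PySem.Chars.splitOn with a one-character separator.
def sos (a : Char) : List Char → List (List Char)
  | [] => [[]]
  | c :: t => if c = a then [] :: sos a t else (sos a t).modifyHead (c :: ·)

theorem sos_ne_nil (a : Char) (l : List Char) : sos a l ≠ [] := by
  cases l with
  | nil => simp [sos]
  | cons c t =>
    simp only [sos]
    split
    · simp
    · cases h : sos a t with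
      | nil => exact absurd h (sos_ne_nil a t)
      | cons x xs => simp [List.modifyHead]

theorem getLast?_cons_of_ne {α : Type} (a : α) (l : List α) (h : l ≠ []) :
    (a :: l).getLast? = l.getLast? := by
  cases l with
  | nil => exact absurd rfl h
  | cons b t => simp

theorem modifyHead_modifyHead {α : Type} (f g : α → α) (l : List α) :
    (l.modifyHead g).modifyHead f = l.modifyHead (fun x => f (g x)) := by
  cases l <;> simp [List.modifyHead]

theorem splitOn_go_eq (a : Char) :
    ∀ (fuel : Nat) (l cur : List Char) (acc : List (List Char)), l.length ≤ fuel →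
      PySem.Chars.splitOn.go [a] fuel l cur acc
        = acc.reverse ++ (sos a l).modifyHead (cur.reverse ++ ·) := by
  intro fuel
  induction fuel with
  | zero =>
    intro l cur acc h
    have : l = [] := List.eq_nil_of_length_eq_zero (Nat.le_zero.mp h)
    subst this
    simp [PySem.Chars.splitOn.go, sos, List.modifyHead]
  | succ n ih =>
    intro l cur acc h
    cases l with
    | nil => simp [PySem.Chars.splitOn.go, sos, List.modifyHead]
    | cons c rest =>
      simp only [PySem.Chars.splitOn.go]
      by_cases hc : a = c
      · subst hc
        have hpre : List.isPrefixOf [a] (a :: rest) = true := by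
          simp [List.isPrefixOf]
        simp only [hpre, reduceIte, List.length_cons, List.length_nil, List.drop_succ_cons, List.drop_zero]
        rw [ih rest [] (cur.reverse :: acc) (by simpa using Nat.le_of_succ_le_succ h)]
        simp only [sos, reduceIte, List.reverse_cons, List.modifyHead, List.reverse_nil,
          List.nil_append, List.append_assoc, List.singleton_append]
        cases sos a rest <;> simp
      · have hpre : List.isPrefixOf [a] (c :: rest) = false := by
          simp [List.isPrefixOf]
          exact hc
        simp only [hpre, Bool.false_eq_true, if_false]
        rw [ih rest (c :: cur) acc (by simpa using Nat.le_of_succ_le_succ h)]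
        have hca : ¬ (c = a) := fun h' => hc h'.symm
        simp only [sos, if_neg hca, modifyHead_modifyHead, List.reverse_cons]
        congr 2
        funext x
        simp

theorem splitOn_eq_sos (a : Char) (l : List Char) :
    PySem.Chars.splitOn l [a] = sos a l := by
  have h := splitOn_go_eq a (l.length + 1) l [] [] (by omega)
  simpa [PySem.Chars.splitOn, List.modifyHead_eq_nil_iff] using h
    |>.trans (by cases hl : sos a l with
      | nil => exact absurd hl (sos_ne_nil a l)
      | cons x xs => simp [List.modifyHead])

-- The per-section update of B's buffer.
def step2 (buf : List Char) (c : Char) : List Char := if c = ':' then [] else buf ++ [c]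

theorem getLast?_sos_colon :
    ∀ (s buf : List Char),
      ((sos ':' s).modifyHead (buf ++ ·)).getLast? = some (s.foldl step2 buf) := by
  intro s
  induction s with
  | nil => intro buf; simp [sos, List.modifyHead]
  | cons c t ih =>
    intro buf
    by_cases hc : c = ':'
    · subst hc
      simp only [sos, reduceIte, List.modifyHead]
      have := ih []
      have h0 : (sos ':' t).modifyHead ([] ++ ·) = sos ':' t := by
        cases sos ':' t <;> simp [List.modifyHead]
      rw [h0] at this
      rw [getLast?_cons_of_ne _ _ (sos_ne_nil ':' t), this]
      simp [List.foldl, step2]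
    · simp only [sos, if_neg hc, modifyHead_modifyHead]
      have heq : (fun x => buf ++ (c :: x)) = (fun x => (buf ++ [c]) ++ x) := by
        funext x; simp
      rw [show (fun x => buf ++ c :: x) = (fun x => (buf ++ [c]) ++ x) from heq, ih (buf ++ [c])]
      simp [List.foldl, step2, hc]

-- Join of processed sections: the first section's buffer starts as `buf`.
def Jb (buf : List Char) : List (List Char) → List Char
  | [] => buf
  | [s] => s.foldl step2 buf
  | s :: t => s.foldl step2 buf ++ '|' :: Jb [] t

theorem Jb_modifyHead (buf : List Char) (c : Char) (L : List (List Char)) (h : L ≠ []) :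
    Jb buf (L.modifyHead (c :: ·)) = Jb (step2 buf c) L := by
  cases L with
  | nil => exact absurd rfl h
  | cons s rest =>
    cases rest with
    | nil => simp [List.modifyHead, Jb, List.foldl]
    | cons r rs => simp [List.modifyHead, Jb, List.foldl]

theorem foldl_nsStep_eq :
    ∀ (l : List Char) (out buf : List Char),
      (l.foldl nsStep (out, buf)).1 ++ (l.foldl nsStep (out, buf)).2
        = out ++ Jb buf (sos '|' l) := by
  intro l
  induction l with
  | nil => intro out buf; simp [Jb, sos]
  | cons c t ih =>
    intro out buf
    by_cases hc : c = ':'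
    · subst hc
      simp only [List.foldl, nsStep, reduceIte]
      rw [ih out []]
      have hne : ¬ (':' = '|') := by decide
      simp only [sos, if_neg hne, Jb_modifyHead buf ':' (sos '|' t) (sos_ne_nil '|' t)]
      simp [step2]
    · by_cases hp : c = '|'
      · subst hp
        simp only [List.foldl, nsStep, if_neg hc, reduceIte]
        rw [ih (out ++ buf ++ ['|']) []]
        simp only [sos, reduceIte]
        cases hs : sos '|' t with
        | nil => exact absurd hs (sos_ne_nil '|' t)
        | cons x xs =>
          cases xs with
          | nil => simp [Jb, List.foldl]
          | cons y ys => simp [Jb, List.foldl]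
      · simp only [List.foldl, nsStep, if_neg hc, if_neg hp]
        rw [ih out (buf ++ [c])]
        simp only [sos, if_neg hp, Jb_modifyHead buf c (sos '|' t) (sos_ne_nil '|' t)]
        simp [step2, hc]

-- A's loop over enumerate(sections).
theorem loopA (n : Int) :
    ∀ (secs : List (List Char)) (k : Int) (acc : List Char), k + secs.length = n →
      (PySem.List.enumerate secs k).foldl
        (fun path p =>
          let path := if p.2 ≠ [] then
              path ++ (PySem.List.pyGet? (PySem.Chars.splitOn p.2 [':']) (-1)).getD []
            else path
          if p.1 < n - 1 then path ++ ['|'] else path) acc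
      = acc ++ Jb [] secs := by
  intro secs
  induction secs with
  | nil => intro k acc h; simp [PySem.List.enumerate, Jb]
  | cons s rest ih =>
    intro k acc h
    rw [PySem.List.enumerate_cons]
    simp only [List.foldl]
    have hsec : (if s ≠ [] then
        acc ++ (PySem.List.pyGet? (PySem.Chars.splitOn s [':']) (-1)).getD [] else acc)
        = acc ++ s.foldl step2 [] := by
      by_cases hs : s = []
      · subst hs; simp [List.foldl]
      · rw [if_pos hs, PySem.List.pyGet?_neg_one, splitOn_eq_sos]
        have := getLast?_sos_colon s []
        have h0 : (sos ':' s).modifyHead ([] ++ ·) = sos ':' s := by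
          cases sos ':' s <;> simp [List.modifyHead]
        rw [h0] at this
        rw [this]
        rfl
    cases rest with
    | nil =>
      have hk : ¬ (k < n - 1) := by
        simp only [List.length_cons, List.length_nil] at h; omega
      simp only [hsec, if_neg hk, PySem.List.enumerate, List.foldl, Jb]
    | cons r rs =>
      have hk : k < n - 1 := by
        simp only [List.length_cons] at h
        have : (0:Int) ≤ (rs.length : Int) := by positivity
        omega
      simp only [hsec, if_pos hk]
      rw [ih (k + 1) _ (by simp at h ⊢; omega)]
      simp [Jb]

-- ===== VERDICT (by name: the statement is the Claim_ definition above) =====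
theorem remove_namespace_spec : Claim_equal_remove_namespace := by
  intro node _
  unfold Spec_remove_namespace remove_namespace remove_namespace_alt
  simp only []
  rw [splitOn_eq_sos]
  congr 1
  rw [loopA ((sos '|' node.toList).length : Int) (sos '|' node.toList) 0 [] (by omega)]
  rw [foldl_nsStep_eq node.toList [] []]
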